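-- pv_equiv track=rewrite | github.com/BadWolf42/jMQTT | resources/jmqttd_api/app/logics/topicmap.py | isNotSubscribable
-- ===== SOURCE A (Python) =====
-- def isNotSubscribable(topic: str):
--     return (
--         len(topic) == 0
--         or len(topic) > 65535
--         or "#/" in topic
--         or any(
--             "+" in level or "#" in level for level in topic.split("/") if len(level) > 1
--         )
--     )
-- ===== SOURCE B (Python) =====
-- def isNotSubscribable(topic: str):
--     n = len(topic)
--     if n == 0 or n > 65535:
--         return True
--     for i, c in enumerate(topic):
--         if c == '+' or c == '#':
--             if i > 0 and topic[i - 1] != '/':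
--                 return True
--             if i + 1 < n and topic[i + 1] != '/':
--                 return True
--             if c == '#' and i + 1 < n and topic[i + 1] == '/':
--                 return True
--     return False
-- ===== Notes on version B (the rewrite author's own statement) =====
-- stated objective: alternative
-- what changed: A splits the topic on the level separator and runs two independent scans (a substring search for hash-then-separator plus an any() over the filtered split levels); B never splits: it makes one character-level pass that judges each wildcard character by its immediate neighbours (a non-separator neighbour means the wildcard sits inside a longer level; a separator right after a hash is the forbidden substring case).
import Mathlib
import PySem

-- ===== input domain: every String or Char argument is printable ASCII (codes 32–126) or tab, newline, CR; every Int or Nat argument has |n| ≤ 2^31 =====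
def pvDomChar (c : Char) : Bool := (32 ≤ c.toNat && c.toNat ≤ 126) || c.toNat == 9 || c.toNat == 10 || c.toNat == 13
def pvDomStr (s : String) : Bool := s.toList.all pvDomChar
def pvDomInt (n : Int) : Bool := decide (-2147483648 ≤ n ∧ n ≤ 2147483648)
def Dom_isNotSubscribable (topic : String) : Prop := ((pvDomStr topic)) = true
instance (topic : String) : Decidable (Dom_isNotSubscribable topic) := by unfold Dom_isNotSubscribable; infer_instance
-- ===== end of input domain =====

-- B replaces A's split-and-scan (plus a separate substring search) by a single character-level pass that judges each wildcard character by its immediate neighbours (alternative algorithm; similar cost).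


-- ===== PORT A =====
-- topic.split("/") on the non-empty literal separator "/" is PySem.Chars.splitOn (PySem.Chars.split? is `some` there).
def isNotSubscribable (topic : String) : Bool :=
  decide (PySem.Str.len topic = 0)
    || decide (65535 < PySem.Str.len topic)
    || PySem.Str.isIn "#/" topic
    || (PySem.Chars.splitOn topic.toList ['/']).any
        (fun level => if 1 < level.length then
            PySem.Chars.isIn ['+'] level || PySem.Chars.isIn ['#'] level
          else false)

-- ===== PORT B =====
-- the for-loop of Source B over enumerate(topic), with its early returns; topic[i-1] / topic[i+1] are pyGet? (the guards keep the Int indices in range, as in the Python)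
def altGo (s : List Char) (n : Int) : List (Int × Char) → Bool
  | [] => false
  | (i, c) :: rest =>
    if c == '+' || c == '#' then
      if 0 < i && !(PySem.List.pyGet? s (i - 1) == some '/') then true
      else if i + 1 < n && !(PySem.List.pyGet? s (i + 1) == some '/') then true
      else if c == '#' && i + 1 < n && PySem.List.pyGet? s (i + 1) == some '/' then true
      else altGo s n rest
    else altGo s n rest

def isNotSubscribable_alt (topic : String) : Bool :=
  let n : Int := PySem.Str.len topic
  if n == 0 || 65535 < n then true
  else altGo topic.toList n (PySem.List.enumerate topic.toList)

-- ===== PRECONDITION & SPEC =====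
def Spec_isNotSubscribable (topic : String) (out : Bool) : Prop := out = isNotSubscribable_alt topic
instance (topic : String) (out : Bool) : Decidable (Spec_isNotSubscribable topic out) := by unfold Spec_isNotSubscribable; infer_instance

-- ===== CLAIM (what is proved, stated in full; the proofs are below) =====
def Claim_equal_isNotSubscribable : Prop := ∀ (topic : String), Dom_isNotSubscribable topic → Spec_isNotSubscribable topic (isNotSubscribable topic)

-- ===== LEMMAS AND PROOFS =====

-- structural reference version of split on '/'
def mySplit : List Char → List (List Char)
  | [] => [[]]
  | c :: rest => if c = '/' then [] :: mySplit rest else (mySplit rest).modifyHead (c :: ·)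

-- structural reference version of A's substring test
def hs : List Char → Bool
  | [] => false
  | c :: rest => (c == '#' && rest.head? == some '/') || hs rest

-- wildcard test and the scan predicates used to relate the sides
def wildB (c : Char) : Bool := c == '+' || c == '#'

def Wl (l : List Char) : Bool := l.contains '+' || l.contains '#'

def pA (l : List Char) : Bool :=
  if 1 < l.length then l.contains '+' || l.contains '#' else false

def bad (b : Bool) (c : Char) (next : Option Char) : Bool :=
  wildB c && (b || (next.isSome && next != some '/') || (c == '#' && next == some '/'))

def scan3 : Bool → List Char → Bool
  | _, [] => false
  | b, c :: rest => bad b c rest.head? || scan3 (decide (c ≠ '/')) rest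

def inLevel (pre : List Char) : Bool :=
  match pre.getLast? with
  | some d => decide (d ≠ '/')
  | none => false

theorem mySplit_ne_nil (s : List Char) : mySplit s ≠ [] := by
  induction s with
  | nil => simp [mySplit]
  | cons c rest ih =>
    simp only [mySplit]
    split
    · simp
    · rcases h : mySplit rest with _ | ⟨a, t⟩
      · exact absurd h ih
      · simp

theorem modifyHead_fun_id {α : Type} (l : List α) : List.modifyHead (fun x => x) l = l := by
  cases l <;> simp

theorem go_eq (l : List Char) : ∀ (fuel : Nat) (cur : List Char) (acc : List (List Char)),
    l.length ≤ fuel →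
    PySem.Chars.splitOn.go ['/'] fuel l cur acc
      = acc.reverse ++ (mySplit l).modifyHead (cur.reverse ++ ·) := by
  induction l with
  | nil =>
    intro fuel cur acc _
    cases fuel <;> simp [PySem.Chars.splitOn.go, mySplit]
  | cons c rest ih =>
    intro fuel cur acc h
    cases fuel with
    | zero => simp at h
    | succ f =>
      simp only [PySem.Chars.splitOn.go]
      by_cases hc : c = '/'
      · subst hc
        rw [if_pos (by simp [List.isPrefixOf])]
        simp only [List.length_cons, List.length_nil, List.drop_succ_cons, List.drop_zero]
        rw [ih f [] _ (by simpa using h)]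
        simp [mySplit, modifyHead_fun_id]
      · rw [if_neg (by simp [List.isPrefixOf]; exact fun hh => absurd hh.symm hc)]
        rw [ih f (c :: cur) acc (by simpa using h)]
        simp only [mySplit, if_neg hc]
        rcases hms : mySplit rest with _ | ⟨hd, tl⟩
        · exact absurd hms (mySplit_ne_nil rest)
        · simp

theorem splitOn_eq_mySplit (s : List Char) : PySem.Chars.splitOn s ['/'] = mySplit s := by
  rw [PySem.Chars.splitOn, go_eq s (s.length + 1) [] [] (by omega)]
  simp [modifyHead_fun_id]

theorem isIn_singleton (c : Char) (l : List Char) : PySem.Chars.isIn [c] l = l.contains c := by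
  rw [Bool.eq_iff_iff, PySem.Chars.isIn_iff_infix]
  constructor
  · intro h
    simpa using h.sublist.subset (by simp)
  · intro h
    obtain ⟨s, t, rfl⟩ := List.append_of_mem (by simpa using h)
    exact ⟨s, t, by simp⟩

theorem isIn_hashslash (s : List Char) : PySem.Chars.isIn ['#', '/'] s = hs s := by
  rw [Bool.eq_iff_iff, PySem.Chars.isIn_iff_infix]
  induction s with
  | nil => simp [hs]
  | cons c rest ih =>
    rw [List.infix_cons_iff]
    simp only [hs, Bool.or_eq_true, Bool.and_eq_true, beq_iff_eq, ← ih]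
    constructor
    · rintro (hp | hi)
      · rw [List.cons_prefix_cons] at hp
        obtain ⟨h1, h2⟩ := hp
        cases rest with
        | nil => simp at h2
        | cons d r =>
          rw [List.cons_prefix_cons] at h2
          exact Or.inl ⟨h1.symm, by simp [← h2.1]⟩
      · exact Or.inr hi
    · rintro (⟨hc, hd⟩ | hi)
      · left
        cases rest with
        | nil => simp at hd
        | cons d r =>
          simp only [List.head?_cons, Option.some.injEq] at hd
          simp [List.cons_prefix_cons, hc, hd]
      · exact Or.inr hi

theorem head_slash_iff (rest h : List Char) (t : List (List Char)) (hms : mySplit rest = h :: t) :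
    (rest.head? == some '/') = (h.isEmpty && !t.isEmpty) := by
  cases rest with
  | nil =>
    simp only [mySplit] at hms
    injection hms with h1 h2
    simp [← h1, ← h2]
  | cons d r =>
    by_cases hd : d = '/'
    · subst hd
      have hms' : ([] : List Char) :: mySplit r = h :: t := by simpa [mySplit] using hms
      injection hms' with h1 h2
      have ht : t ≠ [] := h2 ▸ mySplit_ne_nil r
      simp [← h1, ht]
    · simp only [mySplit, if_neg hd] at hms
      rcases hr : mySplit r with _ | ⟨a, b⟩
      · exact absurd hr (mySplit_ne_nil r)
      · rw [hr] at hms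
        simp only [List.modifyHead_cons] at hms
        injection hms with h1 h2
        simp [← h1, hd]

theorem head_nonslash_iff (rest h : List Char) (t : List (List Char)) (hms : mySplit rest = h :: t) :
    (rest.head?.isSome && rest.head? != some '/') = !h.isEmpty := by
  cases rest with
  | nil =>
    simp only [mySplit] at hms
    injection hms with h1 _
    simp [← h1]
  | cons d r =>
    by_cases hd : d = '/'
    · subst hd
      have hms' : ([] : List Char) :: mySplit r = h :: t := by simpa [mySplit] using hms
      injection hms' with h1 _
      simp [← h1]
    · simp only [mySplit, if_neg hd] at hms
      rcases hr : mySplit r with _ | ⟨a, b⟩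
      · exact absurd hr (mySplit_ne_nil r)
      · rw [hr] at hms
        simp only [List.modifyHead_cons] at hms
        injection hms with h1 _
        simp [← h1, hd]

theorem pA_eq (c : Char) (h : List Char) :
    pA (c :: h) = (!h.isEmpty && (wildB c || Wl h)) := by
  cases h with
  | nil => simp [pA, wildB, Wl]
  | cons d r =>
    simp only [pA, Wl, wildB, List.length_cons, List.contains_cons, List.isEmpty_cons]
    rw [if_pos (by omega)]
    rw [show ('+' == c) = (c == '+') from by rw [Bool.eq_iff_iff]; simp only [beq_iff_eq]; exact eq_comm,
      show ('#' == c) = (c == '#') from by rw [Bool.eq_iff_iff]; simp only [beq_iff_eq]; exact eq_comm]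
    rw [Bool.eq_iff_iff]
    simp only [Bool.not_false, Bool.true_and, Bool.or_eq_true]
    tauto

-- the boolean heart of the per-level vs neighbour correspondence, checked by enumeration
theorem boolKey : ∀ (wc q b he te anyT pAh hsr wh : Bool),
    (pAh = true → wh = true) → (wh = true → he = false) → (q = true → wc = true) →
    ((wc && (b || !he || (q && (he && !te)))) || (hsr || (pAh || anyT) || wh))
      = ((((q && (he && !te)) || hsr) || ((!he && (wc || wh)) || anyT)) || (b && (wc || wh))) := by
  decide

theorem pA_imp_Wl (l : List Char) : pA l = true → Wl l = true := by
  intro hp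
  simp only [pA] at hp
  split at hp
  · simpa [Wl] using hp
  · exact absurd hp (by simp)

theorem Wl_not_empty (l : List Char) : Wl l = true → l.isEmpty = false := by
  intro hw
  cases l with
  | nil => simp [Wl] at hw
  | cons d r => simp

-- the core of the equivalence: the neighbour scan equals substring-scan ∨ per-level scan, with a carry for a pending open level
theorem scan3_eq (s : List Char) : ∀ (b : Bool) (h : List Char) (t : List (List Char)),
    mySplit s = h :: t →
    scan3 b s = (hs s || (h :: t).any pA || (b && Wl h)) := by
  induction s with
  | nil =>
    intro b h t hms
    simp only [mySplit] at hms
    injection hms with h1 h2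
    simp [scan3, hs, ← h1, ← h2, pA, Wl]
  | cons c rest ih =>
    intro b h t hms
    rcases hr : mySplit rest with _ | ⟨h', t'⟩
    · exact absurd hr (mySplit_ne_nil rest)
    by_cases hc : c = '/'
    · subst hc
      rw [show mySplit ('/' :: rest) = [] :: mySplit rest from by simp [mySplit], hr] at hms
      injection hms with h1 h2
      subst h1; subst h2
      simp only [scan3, bad, wildB, show (('/' == '+') || ('/' == '#')) = false by decide,
        Bool.false_and, Bool.false_or]
      rw [show (decide ('/' ≠ '/')) = false by decide, ih false h' t' hr]
      simp [hs, Wl, pA]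
    · rw [show mySplit (c :: rest) = (c :: h') :: t' from by
        simp only [mySplit, if_neg hc, hr, List.modifyHead_cons]] at hms
      injection hms with h1 h2
      subst h1; subst h2
      simp only [scan3, bad]
      rw [show (decide (c ≠ '/')) = true from decide_eq_true hc, ih true h' t' hr]
      simp only [hs, List.any_cons, pA_eq]
      rw [head_nonslash_iff rest h' t' hr, head_slash_iff rest h' t' hr]
      rw [show Wl (c :: h') = (wildB c || Wl h') from by
        simp only [Wl, wildB, List.contains_cons]
        rw [show ('+' == c) = (c == '+') from by rw [Bool.eq_iff_iff]; simp only [beq_iff_eq]; exact eq_comm,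
          show ('#' == c) = (c == '#') from by rw [Bool.eq_iff_iff]; simp only [beq_iff_eq]; exact eq_comm]
        rw [Bool.eq_iff_iff]
        simp only [Bool.or_eq_true]
        tauto]
      have h1 := pA_imp_Wl h'
      have h2 := Wl_not_empty h'
      have h3 : (c == '#') = true → wildB c = true := by
        intro hq; simp [wildB, hq]
      revert h1 h2 h3
      simp only [Bool.true_and]
      generalize wildB c = w
      generalize (c == '#') = q
      generalize pA h' = pah
      generalize Wl h' = wh
      generalize h'.isEmpty = he
      generalize t'.isEmpty = te
      generalize t'.any pA = anyT
      generalize hs rest = hsr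
      intro h1 h2 h3
      exact boolKey w q b he te anyT pah hsr wh h1 h2 h3

-- relate the indexed loop of the B port to the structural scan3
theorem altGo_eq (u : List Char) : ∀ (pre : List Char),
    altGo (pre ++ u) ((pre ++ u).length : Int) (PySem.List.enumerate u (pre.length : Int))
      = scan3 (inLevel pre) u := by
  induction u with
  | nil => intro pre; simp [PySem.List.enumerate_nil, altGo, scan3]
  | cons c rest ih =>
    intro pre
    rw [PySem.List.enumerate_cons]
    simp only [altGo, scan3, bad]
    have hprev : (decide (0 < (pre.length : Int))
        && !(PySem.List.pyGet? (pre ++ c :: rest) ((pre.length : Int) - 1) == some '/'))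
        = inLevel pre := by
      cases hp : pre.getLast? with
      | none =>
        have hpe : pre = [] := by simpa using hp
        subst hpe
        simp [inLevel]
      | some d =>
        obtain ⟨pre', rfl⟩ := List.getLast?_eq_some_iff.mp hp
        have e1 : (((pre' ++ [d]).length : Nat) : Int) - 1 = ((pre'.length : Nat) : Int) := by
          simp only [List.length_append, List.length_cons, List.length_nil]
          push_cast
          ring
        rw [e1, show (pre' ++ [d]) ++ c :: rest = pre' ++ d :: c :: rest from by simp,
          PySem.List.pyGet?_natCast, List.getElem?_append_right (by omega)]
        rw [show pre'.length - pre'.length = 0 from by omega]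
        simp only [List.getElem?_cons_zero]
        rw [decide_eq_true (show (0 : Int) < ((pre' ++ [d]).length : Nat) from by
          simp only [List.length_append, List.length_cons, List.length_nil]
          push_cast
          omega)]
        rw [show inLevel (pre' ++ [d]) = decide (d ≠ '/') from by
          simp [inLevel, List.getLast?_concat]]
        by_cases hd : d = '/' <;> simp [hd]
    have hnextget : PySem.List.pyGet? (pre ++ c :: rest) ((pre.length : Int) + 1)
        = rest.head? := by
      rw [show ((pre.length : Int) + 1) = ((pre.length + 1 : Nat) : Int) from by push_cast; ring,
        PySem.List.pyGet?_natCast, List.getElem?_append_right (by omega)]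
      rw [show pre.length + 1 - pre.length = 1 from by omega]
      simp [List.head?_eq_getElem?]
    have hnextlt : (decide ((pre.length : Int) + 1 < ((pre ++ c :: rest).length : Int)))
        = rest.head?.isSome := by
      cases rest with
      | nil =>
        rw [decide_eq_false (show ¬ ((pre.length : Int) + 1 < ((pre ++ [c]).length : Int)) from by
          simp only [List.length_append, List.length_cons, List.length_nil]
          push_cast
          omega)]
        simp
      | cons d r =>
        rw [decide_eq_true (show ((pre.length : Int) + 1 < ((pre ++ c :: d :: r).length : Int)) from by
          simp only [List.length_append, List.length_cons]
          push_cast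
          omega)]
        simp
    have hrec : altGo (pre ++ c :: rest) ((pre ++ c :: rest).length : Int)
        (PySem.List.enumerate rest ((pre.length : Int) + 1))
        = scan3 (decide (c ≠ '/')) rest := by
      have h := ih (pre ++ [c])
      rw [show (pre ++ [c]) ++ rest = pre ++ c :: rest from by simp] at h
      rw [show (((pre ++ [c]).length : Nat) : Int) = (pre.length : Int) + 1 from by
        simp only [List.length_append, List.length_cons, List.length_nil]
        push_cast
        ring] at h
      rw [show inLevel (pre ++ [c]) = decide (c ≠ '/') from by
        simp [inLevel, List.getLast?_concat]] at h
      exact h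
    rw [hprev, hnextget, hnextlt, hrec]
    simp only [wildB]
    cases hh : rest.head? with
    | none =>
      by_cases w2 : inLevel pre = true <;>
        by_cases w4 : (c == '#') = true <;>
          by_cases w5 : (c == '+') = true <;>
            simp_all
    | some d =>
      by_cases w2 : inLevel pre = true <;>
        by_cases w3 : (d == '/') = true <;>
          by_cases w4 : (c == '#') = true <;>
            by_cases w5 : (c == '+') = true <;>
              simp_all

-- ===== VERDICT (by name: the statement is the Claim_ definition above) =====
theorem isNotSubscribable_spec : Claim_equal_isNotSubscribable := by
  intro topic _
  unfold Spec_isNotSubscribable isNotSubscribable isNotSubscribable_alt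
  by_cases h0 : topic.toList = []
  · simp [PySem.Str.len_eq, h0]
  · by_cases h1 : 65535 < topic.toList.length
    · have ha : decide (65535 < PySem.Str.len topic) = true := by
        rw [PySem.Str.len_eq]
        exact decide_eq_true (by exact_mod_cast h1)
      rw [ha]
      rw [if_pos (by
        simp only [Bool.or_eq_true]
        right
        rw [PySem.Str.len_eq]
        exact decide_eq_true (by exact_mod_cast h1))]
      simp
    · have hlen : topic.toList.length ≠ 0 := by simpa [List.length_eq_zero_iff] using h0
      have hl0 : ¬ PySem.Str.len topic = 0 := by rw [PySem.Str.len_eq]; exact_mod_cast hlen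
      have hl1 : ¬ 65535 < PySem.Str.len topic := by rw [PySem.Str.len_eq]; exact_mod_cast h1
      rw [if_neg (by
        simp only [Bool.or_eq_true, beq_iff_eq, decide_eq_true_eq]
        rintro (hx | hx)
        · exact hl0 hx
        · exact hl1 hx)]
      rw [decide_eq_false hl0, decide_eq_false hl1]
      simp only [Bool.false_or]
      rw [splitOn_eq_mySplit, PySem.Str.isIn_eq,
        show "#/".toList = ['#', '/'] by decide, isIn_hashslash]
      rw [show (fun (level : List Char) => if 1 < level.length then
            PySem.Chars.isIn ['+'] level || PySem.Chars.isIn ['#'] level else false) = pA from by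
        funext l
        simp [pA, isIn_singleton]]
      have hB : altGo topic.toList (PySem.Str.len topic) (PySem.List.enumerate topic.toList)
          = scan3 false topic.toList := by
        have h := altGo_eq topic.toList []
        simp only [List.nil_append, List.length_nil, Nat.cast_zero] at h
        rw [PySem.Str.len_eq]
        rw [show inLevel [] = false from rfl] at h
        exact h
      rw [hB]
      rcases hms : mySplit topic.toList with _ | ⟨h, t⟩
      · exact absurd hms (mySplit_ne_nil _)
      rw [scan3_eq topic.toList false h t hms]
      simp
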